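-- pv_equiv track=rewrite | github.com/Misbahuddin-Moh/pq_app | pq_engine/cli.py | _pick_row_by_name
-- ===== SOURCE A (Python) =====
-- from typing import Any, Dict, List, Optional, Tuple
--
-- def _pick_row_by_name(results: List[Dict[str, Any]], option_name: str) -> Optional[Dict[str, Any]]:
--     for r in results:
--         if r.get("name") == option_name:
--             return r
--     for r in results:
--         if str(r.get("name", "")).startswith(option_name):
--             return r
--     return None
-- ===== SOURCE B (Python) =====
-- from typing import Any, Dict, List, Optional
--
-- def _pick_row_by_name(results: List[Dict[str, Any]], option_name: str) -> Optional[Dict[str, Any]]: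
--     prefix_match = None
--     for r in results:
--         if r.get("name") == option_name:
--             return r
--         if prefix_match is None and str(r.get("name", "")).startswith(option_name):
--             prefix_match = r
--     return prefix_match
-- ===== Notes on version B (the rewrite author's own statement) =====
-- stated objective: simpler
-- what changed: Replaced A's two sequential scans (exact match, then prefix match) by a single pass that returns immediately on the first exact match while recording the first prefix match as a fallback.
import Mathlib
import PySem

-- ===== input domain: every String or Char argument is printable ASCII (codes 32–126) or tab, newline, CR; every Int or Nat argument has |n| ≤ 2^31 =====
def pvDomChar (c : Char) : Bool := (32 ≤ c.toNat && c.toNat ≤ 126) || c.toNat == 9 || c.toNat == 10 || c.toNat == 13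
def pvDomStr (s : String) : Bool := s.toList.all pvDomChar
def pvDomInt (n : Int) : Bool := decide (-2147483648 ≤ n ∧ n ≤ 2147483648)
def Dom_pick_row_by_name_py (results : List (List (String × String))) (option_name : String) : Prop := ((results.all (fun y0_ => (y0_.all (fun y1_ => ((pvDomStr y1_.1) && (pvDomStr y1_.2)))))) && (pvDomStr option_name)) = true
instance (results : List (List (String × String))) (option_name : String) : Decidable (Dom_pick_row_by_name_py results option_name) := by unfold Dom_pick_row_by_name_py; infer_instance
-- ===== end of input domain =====

-- B replaces A's two sequential scans by one pass that returns on the first exact match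
-- and records the first prefix match as a fallback (objective: simpler).

-- ===== PORT A =====
-- r.get("name"): first-match lookup in the row's association list
def pvGetName? (r : List (String × String)) : Option String :=
  (PySem.Dict.mk r).get? "name"

-- first loop of A: first row whose "name" equals option_name
def pvFindExact (results : List (List (String × String))) (option_name : String) :
    Option (List (String × String)) :=
  match results with
  | [] => none
  | r :: rs =>
      if pvGetName? r = some option_name then some r
      else pvFindExact rs option_name

-- second loop of A: first row whose str(r.get("name","")) starts with option_name
def pvFindPrefix (results : List (List (String × String))) (option_name : String) :
    Option (List (String × String)) :=
  match results with
  | [] => none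
  | r :: rs =>
      if PySem.Str.startswith ((pvGetName? r).getD "") option_name then some r
      else pvFindPrefix rs option_name

def pick_row_by_name_py (results : List (List (String × String))) (option_name : String) :
    Option (List (String × String)) :=
  match pvFindExact results option_name with
  | some r => some r
  | none => pvFindPrefix results option_name

-- ===== PORT B =====
-- single pass; acc is the recorded prefix_match
def pvGoB (option_name : String) (results : List (List (String × String)))
    (acc : Option (List (String × String))) : Option (List (String × String)) :=
  match results with
  | [] => acc
  | r :: rs =>
      if pvGetName? r = some option_name then some r
      else
        pvGoB option_name rs
          (if acc.isNone && PySem.Str.startswith ((pvGetName? r).getD "") option_name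
           then some r else acc)

def pick_row_by_name_py_alt (results : List (List (String × String))) (option_name : String) :
    Option (List (String × String)) :=
  pvGoB option_name results none

-- ===== PRECONDITION & SPEC =====
def Spec_pick_row_by_name_py (results : List (List (String × String))) (option_name : String) (out : Option (List (String × String))) : Prop := out = pick_row_by_name_py_alt results option_name
instance (results : List (List (String × String))) (option_name : String) (out : Option (List (String × String))) : Decidable (Spec_pick_row_by_name_py results option_name out) := by unfold Spec_pick_row_by_name_py; infer_instance

-- ===== CLAIM (what is proved, stated in full; the proofs are below) =====
def Claim_equal_pick_row_by_name_py : Prop := ∀ (results : List (List (String × String))) (option_name : String), Dom_pick_row_by_name_py results option_name → Spec_pick_row_by_name_py results option_name (pick_row_by_name_py results option_name)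

-- ===== LEMMAS AND PROOFS =====
theorem pvGoB_eq (option_name : String) (results : List (List (String × String)))
    (acc : Option (List (String × String))) :
    pvGoB option_name results acc =
      match pvFindExact results option_name with
      | some r => some r
      | none => match acc with
                | some a => some a
                | none => pvFindPrefix results option_name := by
  induction results generalizing acc with
  | nil => cases acc <;> simp [pvGoB, pvFindExact, pvFindPrefix]
  | cons r rs ih =>
      by_cases hx : pvGetName? r = some option_name
      · simp [pvGoB, pvFindExact, hx]
      · cases acc with
        | some a => simp [pvGoB, pvFindExact, hx, ih]
        | none =>
            simp only [pvGoB, if_neg hx, Option.isNone_none, Bool.true_and, ih]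
            simp only [pvFindExact, if_neg hx, pvFindPrefix]
            by_cases hp : PySem.Str.startswith ((pvGetName? r).getD "") option_name = true
            · rw [if_pos hp, if_pos hp]
            · rw [if_neg hp, if_neg hp]

-- ===== VERDICT (by name: the statement is the Claim_ definition above) =====
theorem pick_row_by_name_py_spec : Claim_equal_pick_row_by_name_py := by
  intro results option_name _
  unfold Spec_pick_row_by_name_py pick_row_by_name_py pick_row_by_name_py_alt
  rw [pvGoB_eq]
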